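-- pv_equiv track=rewrite | github.com/tonyzhang-maschine/bendlab_arduino_master | playground/archive/jq_glove_capture.py | split_packets
-- ===== SOURCE A (Python) =====
-- def split_packets(data, delimiter):
--     """Split data stream into packets based on delimiter"""
--     packets = []
--     start = 0
--
--     while True:
--         # Find next delimiter
--         pos = data.find(delimiter, start)
--         if pos == -1:
--             break
--
--         # If this is not the first packet, save the previous one
--         if start > 0:
--             packet = data[start:pos]
--             if len(packet) > 0:
--                 packets.append(packet)
--
--         # Move past the delimiter
--         start = pos + len(delimiter)
--
--     # Add the last packet if there's data remaining
--     if start < len(data):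
--         packet = data[start:]
--         if len(packet) > 0:
--             packets.append(packet)
--
--     return packets
-- ===== SOURCE B (Python) =====
-- def split_packets(data, delimiter):
--     """Split data stream into packets based on delimiter (single split pass)."""
--     idx = data.find(delimiter)
--     if idx == -1:
--         return [data] if len(data) > 0 else []
--     rest = data[idx + len(delimiter):]
--     return [p for p in rest.split(delimiter) if len(p) > 0]
-- ===== Notes on version B (the rewrite author's own statement) =====
-- stated objective: simpler
-- what changed: Replaces A's incremental start-maintaining find loop with one data.find to locate the first delimiter, one str.split on the remainder, and a single non-empty filter.
-- outside the precondition, e.g. on split_packets('abc', ''): A does not finish within the time limit, B raises ValueError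
import Mathlib
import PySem

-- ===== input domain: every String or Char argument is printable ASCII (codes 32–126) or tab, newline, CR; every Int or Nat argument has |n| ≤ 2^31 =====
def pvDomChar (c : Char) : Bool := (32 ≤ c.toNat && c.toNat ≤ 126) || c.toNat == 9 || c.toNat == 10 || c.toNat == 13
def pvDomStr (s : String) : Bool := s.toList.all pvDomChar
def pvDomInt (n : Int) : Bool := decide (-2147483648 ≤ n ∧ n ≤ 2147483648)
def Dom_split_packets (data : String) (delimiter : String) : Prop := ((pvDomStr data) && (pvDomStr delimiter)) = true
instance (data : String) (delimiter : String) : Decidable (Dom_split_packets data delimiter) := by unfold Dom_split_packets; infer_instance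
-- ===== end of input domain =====

-- B replaces A's incremental start-maintaining find loop by one find + one str.split + one
-- non-empty filter (objective: simpler). Pre_ excludes only delimiter = "", where A never returns.

-- ===== PORT A =====
-- A's while-loop: state = (packets, start); fuel bounds the iteration count (each found
-- delimiter advances start by at least 1, so (len data)+2 calls always suffice when the
-- delimiter is non-empty; with delimiter = "" Python A loops forever, which is outside Pre_)
def splitPacketsLoop (data delimiter : String) : Nat → List String → Int → (List String × Int)
  | 0, packets, start => (packets, start)
  | fuel+1, packets, start =>
    let pos := PySem.Str.findFrom data delimiter start
    if pos = -1 then (packets, start)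
    else
      let packets' :=
        if start > 0 then
          let packet := PySem.Str.slice data (some start) (some pos)
          if PySem.Str.len packet > 0 then packets ++ [packet] else packets
        else packets
      splitPacketsLoop data delimiter fuel packets' (pos + PySem.Str.len delimiter)

-- the code after A's loop: add the last packet if there's data remaining
def splitPacketsTail (data : String) (r : List String × Int) : List String :=
  if r.2 < PySem.Str.len data then
    let packet := PySem.Str.slice data (some r.2) none
    if PySem.Str.len packet > 0 then r.1 ++ [packet] else r.1
  else r.1

def split_packets (data : String) (delimiter : String) : List String :=
  splitPacketsTail data (splitPacketsLoop data delimiter ((PySem.Str.len data).toNat + 2) [] 0)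

-- ===== PORT B =====
def split_packets_alt (data : String) (delimiter : String) : List String :=
  let idx := PySem.Str.find data delimiter
  if idx = -1 then (if PySem.Str.len data > 0 then [data] else [])
  else
    let rest := PySem.Str.slice data (some (idx + PySem.Str.len delimiter)) none
    match PySem.Str.split? rest delimiter with
    | none => []   -- ValueError in Python (empty delimiter); outside Pre_
    | some parts => parts.filter (fun p => PySem.Str.len p > 0)

-- ===== PRECONDITION & SPEC =====
-- Pre_ excludes only delimiter = "": there Python A never returns (infinite loop:
-- data.find("", start) returns start forever) and Python B raises ValueError from str.split.
def Pre_split_packets (data : String) (delimiter : String) : Prop := delimiter ≠ ""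
instance (data : String) (delimiter : String) : Decidable (Pre_split_packets data delimiter) := by unfold Pre_split_packets; infer_instance
def pvWitness_split_packets : String × String := ("aXbXXc", "X")
def Spec_split_packets (data : String) (delimiter : String) (out : List String) : Prop := out = split_packets_alt data delimiter
instance (data : String) (delimiter : String) (out : List String) : Decidable (Spec_split_packets data delimiter out) := by unfold Spec_split_packets; infer_instance

-- ===== CLAIM (what is proved, stated in full; the proofs are below) =====
def Claim_equal_split_packets : Prop := ∀ (data : String) (delimiter : String), Dom_split_packets data delimiter → Pre_split_packets data delimiter → Spec_split_packets data delimiter (split_packets data delimiter)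

-- ===== LEMMAS AND PROOFS =====

theorem go_zero (d l cur : List Char) (acc : List (List Char)) :
    PySem.Chars.splitOn.go d 0 l cur acc = ((cur.reverse ++ l) :: acc).reverse := by
  cases l <;> rfl

theorem go_nil (d cur : List Char) (acc : List (List Char)) (f : Nat) :
    PySem.Chars.splitOn.go d (f+1) [] cur acc = (cur.reverse :: acc).reverse := rfl

theorem go_cons (d cur : List Char) (acc : List (List Char)) (f : Nat) (c : Char) (rest : List Char) :
    PySem.Chars.splitOn.go d (f+1) (c :: rest) cur acc =
      (if d.isPrefixOf (c :: rest) then PySem.Chars.splitOn.go d f (List.drop d.length (c :: rest)) [] (cur.reverse :: acc)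
       else PySem.Chars.splitOn.go d f rest (c :: cur) acc) := by
  rw [PySem.Chars.splitOn.go]

theorem go_acc (d : List Char) : ∀ (fuel : Nat) (l cur : List Char) (acc : List (List Char)),
    PySem.Chars.splitOn.go d fuel l cur acc = acc.reverse ++ PySem.Chars.splitOn.go d fuel l cur [] := by
  intro fuel
  induction fuel with
  | zero => intro l cur acc; rw [go_zero, go_zero]; simp
  | succ f ih =>
    intro l cur acc
    cases l with
    | nil => rw [go_nil, go_nil]; simp
    | cons c rest =>
      rw [go_cons, go_cons]
      by_cases h : d.isPrefixOf (c :: rest)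
      · rw [if_pos h, if_pos h, ih _ _ (cur.reverse :: acc), ih _ _ ([cur.reverse])]
        simp
      · rw [if_neg h, if_neg h, ih _ _ acc]

theorem go_fuel (d : List Char) (hd : d ≠ []) : ∀ (n : Nat) (l : List Char) (fuel fuel' : Nat) (cur : List Char) (acc : List (List Char)),
    l.length ≤ n → l.length ≤ fuel → l.length ≤ fuel' →
    PySem.Chars.splitOn.go d fuel l cur acc = PySem.Chars.splitOn.go d fuel' l cur acc := by
  intro n
  induction n with
  | zero =>
    intro l fuel fuel' cur acc hn _ _
    have : l = [] := List.eq_nil_of_length_eq_zero (Nat.le_zero.mp hn)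
    subst this
    cases fuel <;> cases fuel' <;> simp [go_zero, go_nil]
  | succ m ih =>
    intro l fuel fuel' cur acc hn hf hf'
    cases l with
    | nil => cases fuel <;> cases fuel' <;> simp [go_zero, go_nil]
    | cons c rest =>
      simp only [List.length_cons] at hn hf hf'
      obtain ⟨f, rfl⟩ : ∃ f, fuel = f + 1 := ⟨fuel - 1, by omega⟩
      obtain ⟨f', rfl⟩ : ∃ f', fuel' = f' + 1 := ⟨fuel' - 1, by omega⟩
      rw [go_cons, go_cons]
      by_cases h : d.isPrefixOf (c :: rest)
      · rw [if_pos h, if_pos h]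
        have hdlen : 1 ≤ d.length := by
          cases d with
          | nil => exact absurd rfl hd
          | cons _ _ => simp
        apply ih <;> simp [List.length_drop] <;> omega
      · rw [if_neg h, if_neg h]
        apply ih <;> omega

theorem go_no_match (d : List Char) : ∀ (l : List Char) (fuel : Nat) (cur : List Char) (acc : List (List Char)),
    ¬ d <:+: l → l.length ≤ fuel →
    PySem.Chars.splitOn.go d fuel l cur acc = acc.reverse ++ [cur.reverse ++ l] := by
  intro l
  induction l with
  | nil => intro fuel cur acc _ _; cases fuel <;> simp [go_zero, go_nil]
  | cons c rest ih =>
    intro fuel cur acc hinf hf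
    simp only [List.length_cons] at hf
    obtain ⟨f, rfl⟩ : ∃ f, fuel = f + 1 := ⟨fuel - 1, by omega⟩
    rw [go_cons]
    have hp : d.isPrefixOf (c :: rest) = false := by
      by_contra h
      exact hinf ((List.isPrefixOf_iff_prefix.mp (by simpa using h)).isInfix)
    rw [if_neg (by simp [hp])]
    rw [ih f (c :: cur) acc (fun h => hinf (List.infix_cons h)) (by omega)]
    simp

theorem go_skip (d : List Char) : ∀ (k : Nat) (l : List Char) (fuel : Nat) (cur : List Char) (acc : List (List Char)),
    k ≤ l.length → l.length ≤ fuel → (∀ i < k, ¬ d <+: l.drop i) →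
    PySem.Chars.splitOn.go d fuel l cur acc =
      PySem.Chars.splitOn.go d (fuel - k) (l.drop k) ((l.take k).reverse ++ cur) acc := by
  intro k
  induction k with
  | zero => intro l fuel cur acc _ _ _; simp
  | succ m ih =>
    intro l fuel cur acc hk hf hno
    cases l with
    | nil => simp at hk
    | cons c rest =>
      simp only [List.length_cons] at hk hf
      obtain ⟨f, rfl⟩ : ∃ f, fuel = f + 1 := ⟨fuel - 1, by omega⟩
      rw [go_cons]
      have hp : d.isPrefixOf (c :: rest) = false := by
        by_contra h
        exact hno 0 (by omega) (by simpa using List.isPrefixOf_iff_prefix.mp (by simpa using h))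
      rw [if_neg (by simp [hp])]
      rw [ih rest f (c :: cur) acc (by omega) (by omega) (fun i hi => by simpa using hno (i+1) (by omega))]
      simp [List.drop_succ_cons, List.take_succ_cons]

theorem go_match_step (d : List Char) (hd : d ≠ []) (l cur : List Char) (acc : List (List Char)) (f : Nat)
    (h : d <+: l) :
    PySem.Chars.splitOn.go d (f+1) l cur acc = PySem.Chars.splitOn.go d f (l.drop d.length) [] (cur.reverse :: acc) := by
  cases l with
  | nil => exact absurd (List.prefix_nil.mp h) hd
  | cons c rest =>
    rw [go_cons]
    simp [List.isPrefixOf_iff_prefix.mpr h]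

theorem splitOn_rec (d l : List Char) (hd : d ≠ []) :
    PySem.Chars.splitOn l d =
      (if PySem.Chars.find l d = -1 then [l]
       else l.take (PySem.Chars.find l d).toNat ::
            PySem.Chars.splitOn (l.drop ((PySem.Chars.find l d).toNat + d.length)) d) := by
  unfold PySem.Chars.splitOn
  by_cases hfind : PySem.Chars.find l d = -1
  · rw [if_pos hfind, go_no_match d l (l.length+1) [] [] ((PySem.Chars.find_eq_neg_one_iff l d).mp hfind) (by omega)]
    simp
  · rw [if_neg hfind]
    have h0 : 0 ≤ PySem.Chars.find l d := by
      have := PySem.Chars.neg_one_le_find l d; omega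
    obtain ⟨hpre, hmin⟩ := PySem.Chars.find_spec (s := l) (sub := d) h0
    set k := (PySem.Chars.find l d).toNat with hk
    have hklen : k ≤ l.length := by
      have := PySem.Chars.find_le_length l d; omega
    have hdlen : 1 ≤ d.length := by
      cases d with
      | nil => exact absurd rfl hd
      | cons a t => simp
    have hkd : k + d.length ≤ l.length := by
      have := hpre.length_le; simp [List.length_drop] at this; omega
    rw [go_skip d k l (l.length+1) [] [] hklen (by omega) hmin]
    have hfe : l.length + 1 - k = (l.length - k) + 1 := by omega
    rw [hfe, go_match_step d hd _ _ _ _ hpre, List.drop_drop]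
    rw [go_acc]
    rw [go_fuel d hd l.length _ _ ((l.drop (k + d.length)).length + 1) _ _ (by simp) (by simp; omega) (by simp)]
    simp

theorem slice_from_toList (data : String) (a : Nat) :
    (PySem.Str.slice data (some (a : Int)) none).toList = data.toList.drop a := by
  rw [PySem.Str.toList_slice]
  simp [PySem.List.slice_from_natCast]

theorem slice_take_toList (data : String) (a k : Nat) :
    (PySem.Str.slice data (some (a : Int)) (some ((a : Int) + (k : Int)))).toList
      = (data.toList.drop a).take k := by
  have h : (a : Int) + (k : Int) = ((a + k : Nat) : Int) := by push_cast; ring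
  rw [PySem.Str.toList_slice, PySem.Chars.slice_eq_listSlice, h, PySem.List.slice_natCast]
  congr 1
  omega

theorem len_ofList (l : List Char) : PySem.Str.len (String.ofList l) = (l.length : Int) := by
  rw [PySem.Str.len_eq]; simp

theorem eq_ofList_of_toList {s : String} {l : List Char} (h : s.toList = l) : s = String.ofList l := by
  subst h; exact String.ofList_toList.symm

theorem loop_stop (data delimiter : String) (f : Nat) (packets : List String) (start : Int)
    (hpos : PySem.Str.findFrom data delimiter start = -1) :
    splitPacketsLoop data delimiter (f+1) packets start = (packets, start) := by
  simp only [splitPacketsLoop]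
  rw [hpos]
  simp

theorem loop_step (data delimiter : String) (f : Nat) (packets : List String) (start : Int)
    (pos : Int) (hpos : PySem.Str.findFrom data delimiter start = pos) (hne : pos ≠ -1) :
    splitPacketsLoop data delimiter (f+1) packets start =
      splitPacketsLoop data delimiter f
        (if start > 0 then
           (if PySem.Str.len (PySem.Str.slice data (some start) (some pos)) > 0
            then packets ++ [PySem.Str.slice data (some start) (some pos)] else packets)
         else packets)
        (pos + PySem.Str.len delimiter) := by
  simp only [splitPacketsLoop]
  rw [hpos, if_neg hne]

theorem loop_inv (data delimiter : String) (hd : delimiter.toList ≠ []) :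
    ∀ (n start fuel : Nat) (packets : List String),
    1 ≤ start → start ≤ data.toList.length →
    data.toList.length - start ≤ n → n + 1 ≤ fuel →
    splitPacketsTail data (splitPacketsLoop data delimiter fuel packets (start : Int)) =
      packets ++ ((PySem.Chars.splitOn (data.toList.drop start) delimiter.toList).map String.ofList).filter
        (fun p => PySem.Str.len p > 0) := by
  intro n
  induction n with
  | zero =>
    intro start fuel packets h1 h2 h3 h4
    have hs : start = data.toList.length := by omega
    have ht : data.toList.drop start = [] := by rw [hs]; simp
    obtain ⟨f, rfl⟩ : ∃ f, fuel = f + 1 := ⟨fuel - 1, by omega⟩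
    have hfind : PySem.Chars.find (data.toList.drop start) delimiter.toList = -1 := by
      rw [PySem.Chars.find_eq_neg_one_iff, ht]
      intro h
      exact hd (List.eq_nil_of_infix_nil h)
    have hpos : PySem.Str.findFrom data delimiter (start : Int) = -1 := by
      rw [PySem.Str.findFrom_eq, PySem.Chars.findFrom_natCast _ _ start h2, hfind]
      simp
    rw [loop_stop data delimiter f packets _ hpos]
    rw [splitOn_rec delimiter.toList (data.toList.drop start) hd, if_pos hfind, ht]
    simp [splitPacketsTail, PySem.Str.len_eq, hs]
  | succ m ih =>
    intro start fuel packets h1 h2 h3 h4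
    obtain ⟨f, rfl⟩ : ∃ f, fuel = f + 1 := ⟨fuel - 1, by omega⟩
    set s := data.toList with hsdef
    set dl := delimiter.toList with hdldef
    set t := s.drop start with htdef
    have hposrw : PySem.Str.findFrom data delimiter (start : Int) =
        if PySem.Chars.find t dl = -1 then -1 else (start : Int) + PySem.Chars.find t dl := by
      rw [PySem.Str.findFrom_eq, PySem.Chars.findFrom_natCast _ _ start h2]
    by_cases hfind : PySem.Chars.find t dl = -1
    · have hpos : PySem.Str.findFrom data delimiter (start : Int) = -1 := by rw [hposrw, if_pos hfind]
      rw [loop_stop data delimiter f packets _ hpos]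
      rw [splitOn_rec dl t hd, if_pos hfind]
      by_cases hlt : start < s.length
      · have htne : 0 < t.length := by simp [htdef]; omega
        have hplist : (PySem.Str.slice data (some (start : Int)) none).toList = t := slice_from_toList data start
        have hpeq : PySem.Str.slice data (some (start : Int)) none = String.ofList t := eq_ofList_of_toList hplist
        simp only [splitPacketsTail, PySem.Str.len_eq, hplist]
        rw [if_pos (by exact_mod_cast hlt), if_pos (by exact_mod_cast htne), hpeq]
        simp [htne]
      · have hs : start = s.length := by omega
        have ht : t = [] := by rw [htdef, hs]; simp
        simp only [splitPacketsTail, PySem.Str.len_eq]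
        rw [if_neg (by exact_mod_cast (by omega : ¬ ((start:Int) < (s.length : Int))))]
        simp [ht]
    · have h0 : 0 ≤ PySem.Chars.find t dl := by have := PySem.Chars.neg_one_le_find t dl; omega
      set kn := (PySem.Chars.find t dl).toNat with hkn
      have hkcast : PySem.Chars.find t dl = (kn : Int) := by omega
      obtain ⟨hpre, hmin⟩ := PySem.Chars.find_spec (s := t) (sub := dl) h0
      have hdlen : 1 ≤ dl.length := List.length_pos_of_ne_nil hd
      have hklen : kn ≤ t.length := by
        have := PySem.Chars.find_le_length t dl; omega
      have hkd : kn + dl.length ≤ t.length := by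
        have := hpre.length_le; simp [List.length_drop] at this; omega
      have htlen : t.length = s.length - start := by simp [htdef]
      have hpos : PySem.Str.findFrom data delimiter (start : Int) = (start : Int) + (kn : Int) := by
        rw [hposrw, if_neg hfind, hkcast]
      have hposne : ((start : Int) + (kn : Int)) ≠ -1 := by omega
      have hgt : ((start : Int) > 0) := by exact_mod_cast h1
      have hplist : (PySem.Str.slice data (some (start : Int)) (some ((start : Int) + (kn : Int)))).toList = t.take kn :=
        slice_take_toList data start kn
      have hpeq : PySem.Str.slice data (some (start : Int)) (some ((start : Int) + (kn : Int))) = String.ofList (t.take kn) :=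
        eq_ofList_of_toList hplist
      have hplen : PySem.Str.len (PySem.Str.slice data (some (start : Int)) (some ((start : Int) + (kn : Int)))) = (kn : Int) := by
        rw [PySem.Str.len_eq, hplist]
        simp
        omega
      rw [loop_step data delimiter f packets _ _ hpos hposne, if_pos hgt, hplen]
      have hnext : (start : Int) + (kn : Int) + PySem.Str.len delimiter = ((start + kn + dl.length : Nat) : Int) := by
        rw [PySem.Str.len_eq]
        push_cast
        ring
      rw [hnext]
      set start2 := start + kn + dl.length with hs2
      have hdrop2 : t.drop (kn + dl.length) = s.drop start2 := by
        rw [htdef, List.drop_drop, hs2]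
        congr 1
        omega
      have hb1 : 1 ≤ start2 := by omega
      have hb2 : start2 ≤ s.length := by omega
      have hb3 : s.length - start2 ≤ m := by omega
      have hb4 : m + 1 ≤ f := by omega
      rw [ih start2 f _ hb1 hb2 hb3 hb4]
      rw [splitOn_rec dl t hd, if_neg hfind, hkcast]
      simp only [Int.toNat_natCast]
      rw [hdrop2, hpeq]
      simp only [List.map_cons, List.filter_cons]
      have hheadlen : PySem.Str.len (String.ofList (t.take kn)) = (kn : Int) := by
        rw [len_ofList]; simp; omega
      by_cases hk0 : 0 < kn
      · rw [if_pos (by exact_mod_cast hk0 : ((kn:Int) > 0)), if_pos (by simp only [hheadlen]; simp; omega)]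
        simp
      · rw [if_neg (by simp; omega), if_neg (by simp only [hheadlen]; simp; omega)]

theorem main_thm (data delimiter : String) (hpre : delimiter ≠ "") :
    split_packets data delimiter = split_packets_alt data delimiter := by
  have hd : delimiter.toList ≠ [] := fun h => hpre (String.toList_eq_nil_iff.mp h)
  have hdlen : 1 ≤ delimiter.toList.length := List.length_pos_of_ne_nil hd
  set s := data.toList with hsdef
  set dl := delimiter.toList with hdldef
  have hfuel : (PySem.Str.len data).toNat + 2 = (s.length + 1) + 1 := by
    rw [PySem.Str.len_eq, ← hsdef]; simp
  have hfind0 : PySem.Str.findFrom data delimiter 0 = PySem.Chars.find s dl := by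
    rw [PySem.Str.findFrom_eq, PySem.Chars.findFrom_zero]
  by_cases hfind : PySem.Chars.find s dl = -1
  · -- no delimiter anywhere: A returns [data] iff data nonempty, and so does B
    unfold split_packets split_packets_alt
    rw [hfuel, loop_stop data delimiter _ [] 0 (by rw [hfind0, hfind])]
    rw [PySem.Str.find_eq, ← hdldef, ← hsdef, if_pos hfind]
    have hplist : (PySem.Str.slice data (some (0 : Int)) none).toList = s := by
      simp [PySem.Str.toList_slice, hsdef]
    have hpeq : PySem.Str.slice data (some (0 : Int)) none = String.ofList s := eq_ofList_of_toList hplist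
    simp only [splitPacketsTail, PySem.Str.len_eq, hplist, ← hsdef]
    by_cases hlen : 0 < s.length
    · rw [if_pos (by exact_mod_cast hlen), if_pos (by exact_mod_cast hlen), if_pos (by exact_mod_cast hlen)]
      rw [hpeq, hsdef, String.ofList_toList]
      simp
    · rw [if_neg (by exact_mod_cast hlen), if_neg (by exact_mod_cast hlen)]
  · -- first delimiter at kn: both sides reduce to the filtered split of the rest
    have h0 : 0 ≤ PySem.Chars.find s dl := by have := PySem.Chars.neg_one_le_find s dl; omega
    set kn := (PySem.Chars.find s dl).toNat with hkn
    have hkcast : PySem.Chars.find s dl = (kn : Int) := by omega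
    obtain ⟨hpre2, hmin⟩ := PySem.Chars.find_spec (s := s) (sub := dl) h0
    have hklen : kn ≤ s.length := by have := PySem.Chars.find_le_length s dl; omega
    have hkd : kn + dl.length ≤ s.length := by
      have := hpre2.length_le; simp [List.length_drop] at this; omega
    have hnext : (kn : Int) + PySem.Str.len delimiter = ((kn + dl.length : Nat) : Int) := by
      rw [PySem.Str.len_eq]; push_cast; ring
    unfold split_packets split_packets_alt
    rw [hfuel, loop_step data delimiter _ [] 0 (kn : Int) (by rw [hfind0, hkcast]) (by omega)]
    rw [if_neg (by omega : ¬ ((0:Int) > 0)), hnext]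
    rw [loop_inv data delimiter hd (s.length - (kn + dl.length)) (kn + dl.length) (s.length + 1) []
      (by omega) (by rw [← hsdef]; omega) (by rw [← hsdef]) (by omega)]
    rw [PySem.Str.find_eq, ← hdldef, ← hsdef, if_neg hfind, hkcast, hnext]
    have hrest : (PySem.Str.slice data (some ((kn + dl.length : Nat) : Int)) none).toList = s.drop (kn + dl.length) :=
      slice_from_toList data (kn + dl.length)
    have hsplit : PySem.Str.split? (PySem.Str.slice data (some ((kn + dl.length : Nat) : Int)) none) delimiter =
        some ((PySem.Chars.splitOn (s.drop (kn + dl.length)) dl).map String.ofList) := by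
      rw [PySem.Str.split?, hrest, ← hdldef, PySem.Chars.split?]
      rw [if_neg (by simpa using hd)]
      rfl
    simp only [hsplit]
    simp

-- ===== VERDICT (by name: the statement is the Claim_ definition above) =====
theorem split_packets_spec : Claim_equal_split_packets := by
  intro data delimiter _ hpre
  unfold Spec_split_packets
  exact main_thm data delimiter hpre
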